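-- pv_equiv track=rewrite | github.com/AFDWang/Hetu-Galvatron | galvatron/core/profiler/hardware_profiler.py | generate_p2p_groups
-- ===== SOURCE A (Python) =====
-- from typing import List, Tuple, Union
--
-- def generate_p2p_groups(world_size: int, pp_size: int) -> List[List[int]]:
--     """Generate groups for point-to-point communication
--
--     Args:
--         world_size: Total number of processes
--         pp_size: Size of each pipeline parallel group
--
--     Returns:
--         List[List[int]]: List of process groups for p2p communication
--     """
--     pp_size = int(pp_size)
--     num_pp_groups = int(world_size // pp_size)
--     pp_groups = []
--     for i in range(num_pp_groups):
--         ranks = list(range(i, world_size, num_pp_groups))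
--         pp_groups.append(ranks)
--     return pp_groups
-- ===== SOURCE B (Python) =====
-- def generate_p2p_groups(world_size, pp_size):
--     pp_size = int(pp_size)
--     num_pp_groups = int(world_size // pp_size)
--     if num_pp_groups <= 0:
--         return []
--     pp_groups = [[] for _ in range(num_pp_groups)]
--     for r in range(world_size):
--         pp_groups[r % num_pp_groups].append(r)
--     return pp_groups
-- ===== Notes on version B (the rewrite author's own statement) =====
-- stated objective: alternative
-- what changed: B replaces A's per-group construction of strided ranges by a single pass over all ranks that scatters each rank r into bucket r % num_pp_groups of pre-created empty buckets (guarded so num_pp_groups <= 0 still yields []).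
-- outside the precondition, e.g. on generate_p2p_groups(8, 0): A raises ZeroDivisionError, B raises ZeroDivisionError
import Mathlib
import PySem

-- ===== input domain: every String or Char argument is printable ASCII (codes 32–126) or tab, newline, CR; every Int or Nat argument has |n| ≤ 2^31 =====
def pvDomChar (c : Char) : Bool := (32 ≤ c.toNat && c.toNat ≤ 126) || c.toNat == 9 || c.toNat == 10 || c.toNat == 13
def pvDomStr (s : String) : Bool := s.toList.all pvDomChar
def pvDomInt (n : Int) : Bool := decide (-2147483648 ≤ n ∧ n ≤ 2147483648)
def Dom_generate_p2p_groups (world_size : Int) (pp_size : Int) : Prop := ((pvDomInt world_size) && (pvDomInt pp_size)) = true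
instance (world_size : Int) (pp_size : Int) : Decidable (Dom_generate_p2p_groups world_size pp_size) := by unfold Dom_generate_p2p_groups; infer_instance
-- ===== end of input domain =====

-- B replaces A's per-group strided range construction by a single modulo-scatter pass
-- over all ranks into pre-created buckets (objective: alternative decomposition, same cost).


-- ===== PORT A =====
def generate_p2p_groups (world_size : Int) (pp_size : Int) : List (List Int) :=
  let num_pp_groups := PySem.Int.floordiv world_size pp_size
  (PySem.List.pyRange 0 num_pp_groups 1).foldl
    (fun pp_groups i => pp_groups ++ [PySem.List.pyRange i world_size num_pp_groups]) []

-- ===== PORT B =====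
def generate_p2p_groups_alt (world_size : Int) (pp_size : Int) : List (List Int) :=
  let num_pp_groups := PySem.Int.floordiv world_size pp_size
  if num_pp_groups ≤ 0 then []
  else
    let init : List (List Int) := (PySem.List.pyRange 0 num_pp_groups 1).map (fun _ => [])
    (PySem.List.pyRange 0 world_size 1).foldl
      (fun bs r => bs.modify (PySem.Int.mod r num_pp_groups).toNat (fun g => g ++ [r])) init

-- ===== PRECONDITION & SPEC =====
-- Pre_ excludes exactly pp_size = 0, where Python A raises ZeroDivisionError.
def Pre_generate_p2p_groups (world_size : Int) (pp_size : Int) : Prop := pp_size ≠ 0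
instance (world_size : Int) (pp_size : Int) : Decidable (Pre_generate_p2p_groups world_size pp_size) := by unfold Pre_generate_p2p_groups; infer_instance
def pvWitness_generate_p2p_groups : Int × Int := (8, 2)

def Spec_generate_p2p_groups (world_size : Int) (pp_size : Int) (out : List (List Int)) : Prop := out = generate_p2p_groups_alt world_size pp_size
instance (world_size : Int) (pp_size : Int) (out : List (List Int)) : Decidable (Spec_generate_p2p_groups world_size pp_size out) := by unfold Spec_generate_p2p_groups; infer_instance

-- ===== CLAIM (what is proved, stated in full; the proofs are below) =====
def Claim_equal_generate_p2p_groups : Prop := ∀ (world_size : Int) (pp_size : Int), Dom_generate_p2p_groups world_size pp_size → Pre_generate_p2p_groups world_size pp_size → Spec_generate_p2p_groups world_size pp_size (generate_p2p_groups world_size pp_size)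

-- ===== LEMMAS AND PROOFS =====

-- A positive-step range with start ≥ stop is empty.
theorem pyRange_pos_nil (a b s : Int) (hs : 0 < s) (hba : b ≤ a) :
    PySem.List.pyRange a b s = [] := by
  rw [PySem.List.pyRange_of_pos _ _ hs, if_neg (not_lt.2 hba)]
  simp

-- A positive-step range is the unit-step range filtered by divisibility of the offset.
theorem pyRange_pos_eq_filter (a b s : Int) (hs : 0 < s) :
    PySem.List.pyRange a b s
      = (PySem.List.pyRange a b 1).filter (fun x => decide (s ∣ x - a)) := by
  have hL : (PySem.List.pyRange a b s).Pairwise (· < ·) := by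
    rw [PySem.List.pyRange_of_pos _ _ hs]
    refine List.Pairwise.map _ ?_ List.pairwise_lt_range
    intro i j hij
    have : (i : Int) < (j : Int) := by exact_mod_cast hij
    nlinarith
  have hR : ((PySem.List.pyRange a b 1).filter (fun x => decide (s ∣ x - a))).Pairwise (· < ·) :=
    List.Pairwise.filter _ (PySem.List.pairwise_lt_pyRange_one a b)
  have hmem : ∀ x : Int, x ∈ PySem.List.pyRange a b s ↔
      x ∈ (PySem.List.pyRange a b 1).filter (fun x => decide (s ∣ x - a)) := by
    intro x
    rw [PySem.List.mem_pyRange_iff_of_pos hs, List.mem_filter]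
    rw [PySem.List.mem_pyRange_one]
    simp
    tauto
  have hperm : (PySem.List.pyRange a b s).Perm
      ((PySem.List.pyRange a b 1).filter (fun x => decide (s ∣ x - a))) := by
    rw [List.perm_ext_iff_of_nodup
      (hL.imp ne_of_lt) (hR.imp ne_of_lt)]
    exact hmem
  exact hperm.eq_of_sorted (fun _ _ _ _ => le_antisymm)
    (hL.imp le_of_lt) (hR.imp le_of_lt)

-- Extending the stop by one appends b exactly when b lands on the stride.
theorem pyRange_pos_succ (a b s : Int) (hs : 0 < s) :
    PySem.List.pyRange a (b + 1) s
      = PySem.List.pyRange a b s ++ (if a ≤ b ∧ s ∣ b - a then [b] else []) := by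
  by_cases hab : a ≤ b
  · rw [pyRange_pos_eq_filter _ _ _ hs, pyRange_pos_eq_filter _ _ _ hs,
      PySem.List.pyRange_one_succ_right hab, List.filter_append]
    congr 1
    by_cases hd : s ∣ b - a <;> simp [hd, hab]
  · have h1 : b + 1 ≤ a := by omega
    rw [pyRange_pos_nil _ _ _ hs h1, pyRange_pos_nil _ _ _ hs (by omega)]
    simp [hab]

-- Modifying one entry of a mapped range is mapping a pointwise conditional update.
theorem modify_map_range {α : Type} (N : Nat) (g : Nat → α) (f : α → α) (j : Nat) :
    ((List.range N).map g).modify j f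
      = (List.range N).map (fun k => if k = j then f (g k) else g k) := by
  apply List.ext_getElem
  · simp [List.length_modify]
  · intro k hk hk'
    simp only [List.length_modify, List.length_map, List.length_range] at hk
    rw [List.getElem_modify]
    simp [List.getElem_map, List.getElem_range]
    by_cases h : j = k
    · subst h; simp
    · simp [h, Ne.symm h]

-- For 0 ≤ m and 0 ≤ k < n, bucket index k receives m iff k = m mod n.
theorem mod_bucket_iff (n m : Int) (hn : 0 < n) (hm : 0 ≤ m) (k : Nat)
    (hk : (k : Int) < n) :
    ((k : Int) = PySem.Int.mod m n) ↔ ((k : Int) ≤ m ∧ n ∣ m - (k : Int)) := by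
  rw [PySem.Int.mod_eq_emod_of_pos hn]
  constructor
  · intro hk2
    have hdiv : 0 ≤ m / n := Int.ediv_nonneg hm (le_of_lt hn)
    have heq : m % n + n * (m / n) = m := Int.emod_add_mul_ediv m n
    constructor
    · nlinarith
    · exact ⟨m / n, by linarith⟩
  · rintro ⟨hle, q, hq⟩
    have hkm : m = (k : Int) + n * q := by linarith
    rw [hkm]
    rw [Int.add_mul_emod_self_left]
    exact (Int.emod_eq_of_lt (by positivity) hk).symm

-- Scattering ranks 0..m-1 into n buckets by (· mod n) yields the strided ranges.
theorem scatter_eq (n : Int) (hn : 0 < n) (m : Nat) :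
    (PySem.List.pyRange 0 (m : Int) 1).foldl
        (fun bs r => bs.modify (PySem.Int.mod r n).toNat (fun g => g ++ [r]))
        ((List.range n.toNat).map (fun _ => ([] : List Int)))
      = (List.range n.toNat).map (fun k : Nat => PySem.List.pyRange (k : Int) (m : Int) n) := by
  induction m with
  | zero =>
    rw [PySem.List.pyRange_one_eq_nil (by omega)]
    simp only [List.foldl_nil, Nat.cast_zero]
    apply List.map_congr_left
    intro k _
    exact (pyRange_pos_nil _ _ _ hn (by positivity)).symm
  | succ m ih =>
    have hcast : ((m + 1 : Nat) : Int) = (m : Int) + 1 := by push_cast; ring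
    rw [hcast, PySem.List.pyRange_one_succ_right (by positivity), List.foldl_append,
      List.foldl_cons, List.foldl_nil, ih]
    have hmodlt : PySem.Int.mod (m : Int) n < n := PySem.Int.mod_lt _ hn
    have hmodnn : 0 ≤ PySem.Int.mod (m : Int) n := PySem.Int.mod_nonneg _ hn
    rw [modify_map_range]
    apply List.map_congr_left
    intro k hk
    have hkn : (k : Int) < n := by
      rw [List.mem_range] at hk; omega
    rw [pyRange_pos_succ _ _ _ hn]
    have hiff := mod_bucket_iff n (m : Int) hn (by positivity) k hkn
    by_cases h : k = (PySem.Int.mod (m : Int) n).toNat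
    · have hkeq : (k : Int) = PySem.Int.mod (m : Int) n := by omega
      rw [if_pos h, if_pos (hiff.mp hkeq)]
    · have hkne : ¬ ((k : Int) = PySem.Int.mod (m : Int) n) := by omega
      rw [if_neg h, if_neg (fun hc => hkne (hiff.mpr hc))]
      simp

-- ===== VERDICT (by name: the statement is the Claim_ definition above) =====
theorem generate_p2p_groups_spec : Claim_equal_generate_p2p_groups := by
  intro ws ps _ _
  unfold Spec_generate_p2p_groups generate_p2p_groups generate_p2p_groups_alt
  simp only []
  set n := PySem.Int.floordiv ws ps with hn
  rw [PySem.List.foldl_append_singleton_eq_map]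
  simp only [List.nil_append]
  by_cases hpos : n ≤ 0
  · rw [if_pos hpos, PySem.List.pyRange_one_eq_nil (by omega)]
    simp
  · push_neg at hpos
    rw [if_neg (by omega)]
    have hrange : PySem.List.pyRange 0 n 1 = (List.range n.toNat).map (fun k : Nat => (k : Int)) := by
      rw [PySem.List.pyRange_one]
      simp
    rw [hrange, List.map_map, List.map_map]
    by_cases hws : ws ≤ 0
    · rw [PySem.List.pyRange_one_eq_nil (by omega)]
      simp only [List.foldl_nil]
      apply List.map_congr_left
      intro k _
      exact pyRange_pos_nil _ _ _ hpos (by show ws ≤ (k:Int); omega)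
    · push_neg at hws
      have hwsc : ws = ((ws.toNat : Nat) : Int) := by omega
      rw [hwsc]
      simpa [Function.comp_def] using (scatter_eq n hpos ws.toNat).symm
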